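-- pv_equiv track=rewrite | github.com/lucatume/completamente | rhdp/57-harness-order89-context-quality.py | window_around_lines
-- ===== SOURCE A (Python) =====
-- def window_around_lines(source: str, center_lines: list[int], half_window: int) -> str:
--     """Extract a window of lines around each center line, merge overlapping windows."""
--     lines = source.split("\n")
--     included = set()
--     for center in center_lines:
--         start = max(0, center - half_window)
--         end = min(len(lines), center + half_window + 1)
--         for i in range(start, end):
--             included.add(i)
--
--     # Always include the first few lines (namespace, use, class declaration)
--     for i in range(min(8, len(lines))):
--         included.add(i)
--
--     result_lines = []
--     prev = -2
--     for i in sorted(included):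
--         if i > prev + 1:
--             if result_lines:
--                 result_lines.append("    // ...")
--         result_lines.append(lines[i])
--         prev = i
--
--     return "\n".join(result_lines)
-- ===== SOURCE B (Python) =====
-- def window_around_lines(source: str, center_lines: list[int], half_window: int) -> str:
--     """Single pass over the lines with a membership predicate; no set, no sort."""
--     lines = source.split("\n")
--     out = []
--     prev = -2
--     for i, line in enumerate(lines):
--         if i < 8 or any(c - half_window <= i <= c + half_window for c in center_lines):
--             if i > prev + 1 and out:
--                 out.append("    // ...")
--             out.append(line)
--             prev = i
--     return "\n".join(out)
-- ===== Notes on version B (the rewrite author's own statement) =====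
-- stated objective: simpler
-- what changed: Replaces the set-of-indices accumulation plus sort with a single in-order pass over the lines that tests each index against a membership predicate (i < 8 or within half_window of some center), emitting lines and gap markers on the fly.
import Mathlib
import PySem

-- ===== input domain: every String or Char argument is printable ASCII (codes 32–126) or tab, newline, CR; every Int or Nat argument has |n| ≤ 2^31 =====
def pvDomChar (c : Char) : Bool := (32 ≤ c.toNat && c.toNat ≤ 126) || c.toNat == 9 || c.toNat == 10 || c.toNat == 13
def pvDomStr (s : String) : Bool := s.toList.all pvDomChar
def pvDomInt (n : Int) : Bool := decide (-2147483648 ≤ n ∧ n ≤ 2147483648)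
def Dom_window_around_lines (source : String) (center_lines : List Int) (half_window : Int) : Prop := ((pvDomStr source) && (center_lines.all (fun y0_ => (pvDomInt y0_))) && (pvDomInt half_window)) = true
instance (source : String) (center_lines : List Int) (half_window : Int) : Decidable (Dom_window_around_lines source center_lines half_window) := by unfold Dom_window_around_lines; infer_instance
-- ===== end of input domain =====

-- B replaces A's index-set accumulation + sort by a single in-order pass over the lines
-- with a membership predicate (objective: simpler).

-- ===== PORT A =====
-- literal port of A: build a set of included indices, sort it, walk with gap markers.
-- lines[i] is ported as pyGetD with default "": every sorted index is a valid index, so the default is unreachable.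
def window_around_lines (source : String) (center_lines : List Int) (half_window : Int) : String :=
  let lines := (PySem.Str.split? source "\n").getD []
  let included : PySem.Set Int :=
    center_lines.foldl (fun s c =>
      (PySem.List.pyRange (max 0 (c - half_window)) (min (lines.length : Int) (c + half_window + 1)) 1).foldl
        PySem.Set.add s) PySem.Set.empty
  let included := (PySem.List.pyRange 0 (min 8 (lines.length : Int)) 1).foldl PySem.Set.add included
  let st := (PySem.List.sorted included (fun x => x) false).foldl
    (fun (st : List String × Int) i =>
      let rl := if i > st.2 + 1 then (if st.1 ≠ [] then st.1 ++ ["    // ..."] else st.1) else st.1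
      (rl ++ [PySem.List.pyGetD lines i ""], i)) ([], -2)
  PySem.Str.join "\n" st.1

-- ===== PORT B =====
-- literal port of B: one pass over enumerate(lines) with the membership predicate.
def window_around_lines_alt (source : String) (center_lines : List Int) (half_window : Int) : String :=
  let lines := (PySem.Str.split? source "\n").getD []
  let st := (PySem.List.enumerate lines 0).foldl
    (fun (st : List String × Int) p =>
      if decide (p.1 < 8) || center_lines.any (fun c => decide (c - half_window ≤ p.1) && decide (p.1 ≤ c + half_window)) then
        let out := if p.1 > st.2 + 1 ∧ st.1 ≠ [] then st.1 ++ ["    // ..."] else st.1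
        (out ++ [p.2], p.1)
      else st) ([], -2)
  PySem.Str.join "\n" st.1

-- ===== PRECONDITION & SPEC =====
def Spec_window_around_lines (source : String) (center_lines : List Int) (half_window : Int) (out : String) : Prop := out = window_around_lines_alt source center_lines half_window
instance (source : String) (center_lines : List Int) (half_window : Int) (out : String) : Decidable (Spec_window_around_lines source center_lines half_window out) := by unfold Spec_window_around_lines; infer_instance

-- ===== CLAIM (what is proved, stated in full; the proofs are below) =====
def Claim_equal_window_around_lines : Prop := ∀ (source : String) (center_lines : List Int) (half_window : Int), Dom_window_around_lines source center_lines half_window → Spec_window_around_lines source center_lines half_window (window_around_lines source center_lines half_window)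

-- ===== LEMMAS AND PROOFS =====

-- membership and nodup through the inner 'for i in range(...): included.add(i)' loop
theorem pv_mem_foldl_add (l : List Int) (s : PySem.Set Int) (y : Int) :
    y ∈ l.foldl PySem.Set.add s ↔ y ∈ s ∨ y ∈ l := by
  induction l generalizing s with
  | nil => simp
  | cons x t ih =>
    simp only [List.foldl_cons, ih, PySem.Set.mem_add, List.mem_cons]
    tauto

theorem pv_nodup_foldl_add (l : List Int) (s : PySem.Set Int) (hs : s.Nodup) :
    (l.foldl PySem.Set.add s).Nodup := by
  induction l generalizing s with
  | nil => exact hs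
  | cons x t ih => exact ih _ (PySem.Set.nodup_add _ _ hs)

-- membership and nodup through the outer 'for center in center_lines' loop
theorem pv_mem_outer (r : Int → List Int) (cl : List Int) (s : PySem.Set Int) (y : Int) :
    y ∈ cl.foldl (fun s c => (r c).foldl PySem.Set.add s) s ↔ y ∈ s ∨ ∃ c ∈ cl, y ∈ r c := by
  induction cl generalizing s with
  | nil => simp
  | cons c t ih =>
    simp only [List.foldl_cons, ih, pv_mem_foldl_add, List.mem_cons]
    constructor
    · rintro ((h | h) | ⟨c', hc', h⟩)
      · exact Or.inl h
      · exact Or.inr ⟨c, Or.inl rfl, h⟩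
      · exact Or.inr ⟨c', Or.inr hc', h⟩
    · rintro (h | ⟨c', (rfl | hc'), h⟩)
      · exact Or.inl (Or.inl h)
      · exact Or.inl (Or.inr h)
      · exact Or.inr ⟨c', hc', h⟩

theorem pv_nodup_outer (r : Int → List Int) (cl : List Int) (s : PySem.Set Int) (hs : s.Nodup) :
    (cl.foldl (fun s c => (r c).foldl PySem.Set.add s) s).Nodup := by
  induction cl generalizing s with
  | nil => exact hs
  | cons c t ih => exact ih _ (pv_nodup_foldl_add _ _ hs)

-- the sorted set of included indices IS the in-order filter of all line indices
theorem pv_sorted_eq_filter (lines : List String) (cl : List Int) (h : Int) :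
    PySem.List.sorted
        ((PySem.List.pyRange 0 (min 8 (lines.length : Int)) 1).foldl PySem.Set.add
          (cl.foldl (fun s c =>
            (PySem.List.pyRange (max 0 (c - h)) (min (lines.length : Int) (c + h + 1)) 1).foldl
              PySem.Set.add s) PySem.Set.empty))
        (fun x => x) false
      = (PySem.List.pyRange 0 (lines.length : Int) 1).filter
          (fun i => decide (i < 8) || cl.any (fun c => decide (c - h ≤ i) && decide (i ≤ c + h))) := by
  apply PySem.List.sorted_eq_of_perm_of_pairwise_lt
  · refine (List.perm_ext_iff_of_nodup
      (List.Nodup.filter _ (PySem.List.nodup_pyRange_one 0 (lines.length : Int)))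
      (pv_nodup_foldl_add _ _ (pv_nodup_outer _ _ _ List.nodup_nil))).mpr ?_
    intro y
    simp only [List.mem_filter, PySem.List.mem_pyRange_one, pv_mem_foldl_add, pv_mem_outer,
      List.not_mem_nil, false_or, Bool.or_eq_true, decide_eq_true_eq, List.any_eq_true,
      Bool.and_eq_true]
    constructor
    · rintro ⟨⟨hy0, hyn⟩, (hy8 | ⟨c, hc, h1, h2⟩)⟩
      · exact Or.inr (by omega)
      · exact Or.inl ⟨c, hc, by omega, by omega⟩
    · rintro (⟨c, hc, h1, h2⟩ | ⟨h1, h2⟩)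
      · exact ⟨⟨by omega, by omega⟩, Or.inr ⟨c, hc, by omega, by omega⟩⟩
      · exact ⟨⟨by omega, by omega⟩, Or.inl (by omega)⟩
  · exact List.Pairwise.filter _ (PySem.List.pairwise_lt_pyRange_one 0 (lines.length : Int))

-- A's walk body and B's walk body are the same state transformer
theorem pv_step_eq (lines : List String) :
    (fun (st : List String × Int) (i : Int) =>
      ((if i > st.2 + 1 then (if st.1 ≠ [] then st.1 ++ ["    // ..."] else st.1) else st.1)
          ++ [PySem.List.pyGetD lines i ""], i))
    = (fun (st : List String × Int) (i : Int) =>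
      ((if i > st.2 + 1 ∧ st.1 ≠ [] then st.1 ++ ["    // ..."] else st.1)
          ++ [PySem.List.pyGetD lines i ""], i)) := by
  funext st i
  by_cases h1 : i > st.2 + 1 <;> by_cases h2 : st.1 = [] <;> simp [h1, h2]

theorem window_around_lines_key (source : String) (center_lines : List Int) (half_window : Int) :
    window_around_lines source center_lines half_window
      = window_around_lines_alt source center_lines half_window := by
  simp only [window_around_lines, window_around_lines_alt]
  rw [pv_sorted_eq_filter, pv_step_eq, PySem.List.enumerate_eq_map_pyRange _ "", List.foldl_map]
  simp only [PySem.List.len_eq]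
  rw [PySem.List.foldl_if_eq_foldl_filter]

-- ===== VERDICT (by name: the statement is the Claim_ definition above) =====
theorem window_around_lines_spec : Claim_equal_window_around_lines := by
  intro source center_lines half_window _
  exact window_around_lines_key source center_lines half_window
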